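-- pv_equiv track=rewrite | github.com/skype909/Elume | backend/scripts/rebuild_exam_manifest.py | _paper_suffix_from_tokens
-- ===== SOURCE A (Python) =====
-- def _paper_suffix_from_tokens(tokens: list[str]) -> tuple[str | None, str | None]:
--     upper_tokens = [token.upper() for token in tokens]
--     if "P1" in upper_tokens:
--         return "Paper 1", "paper-1"
--     if "P2" in upper_tokens:
--         return "Paper 2", "paper-2"
--     if "AB" in upper_tokens:
--         return "Section AB", "section-ab"
--     if "C" in upper_tokens:
--         return "Section C", "section-c"
--     return None, None
-- ===== SOURCE B (Python) =====
-- _TABLE = {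
--     "P1": (0, ("Paper 1", "paper-1")),
--     "P2": (1, ("Paper 2", "paper-2")),
--     "AB": (2, ("Section AB", "section-ab")),
--     "C": (3, ("Section C", "section-c")),
-- }
--
--
-- def _paper_suffix_from_tokens(tokens: list[str]) -> tuple[str | None, str | None]:
--     best_rank = 4
--     best = (None, None)
--     for token in tokens:
--         hit = _TABLE.get(token.upper())
--         if hit is not None and hit[0] < best_rank:
--             best_rank, best = hit
--     return best
-- ===== Notes on version B (the rewrite author's own statement) =====
-- stated objective: alternative
-- what changed: Replaced four priority-ordered membership scans over an intermediate uppercased list by a single pass over tokens tracking the minimal-rank match in a (rank, result) accumulator via a token->(rank, labels) table.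
import Mathlib
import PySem

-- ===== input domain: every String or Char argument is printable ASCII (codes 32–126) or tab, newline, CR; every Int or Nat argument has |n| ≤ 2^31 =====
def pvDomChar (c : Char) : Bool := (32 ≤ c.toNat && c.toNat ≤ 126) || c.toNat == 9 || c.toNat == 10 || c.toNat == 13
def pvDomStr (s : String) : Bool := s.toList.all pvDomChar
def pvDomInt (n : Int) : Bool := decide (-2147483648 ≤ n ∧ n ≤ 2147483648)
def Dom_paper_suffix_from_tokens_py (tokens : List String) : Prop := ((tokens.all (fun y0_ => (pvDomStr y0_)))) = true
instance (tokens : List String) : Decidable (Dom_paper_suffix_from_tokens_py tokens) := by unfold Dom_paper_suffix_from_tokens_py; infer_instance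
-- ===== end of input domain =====

-- B replaces A's four priority-ordered membership scans by one pass over the tokens tracking
-- the minimal-rank table hit (objective: alternative decomposition; same asymptotic cost).

-- ===== PORT A =====
def paper_suffix_from_tokens_py (tokens : List String) : Option String × Option String :=
  let upper_tokens := tokens.map PySem.Str.upper
  if "P1" ∈ upper_tokens then (some "Paper 1", some "paper-1")
  else if "P2" ∈ upper_tokens then (some "Paper 2", some "paper-2")
  else if "AB" ∈ upper_tokens then (some "Section AB", some "section-ab")
  else if "C" ∈ upper_tokens then (some "Section C", some "section-c")
  else (none, none)

-- ===== PORT B =====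
def pvTable : PySem.Dict String (Nat × (Option String × Option String)) :=
  PySem.Dict.mk
    [("P1", (0, (some "Paper 1", some "paper-1"))),
     ("P2", (1, (some "Paper 2", some "paper-2"))),
     ("AB", (2, (some "Section AB", some "section-ab"))),
     ("C",  (3, (some "Section C", some "section-c")))]

def pvStep (best : Nat × (Option String × Option String)) (token : String) :
    Nat × (Option String × Option String) :=
  match PySem.Dict.get? pvTable (PySem.Str.upper token) with
  | some hit => if hit.1 < best.1 then hit else best
  | none => best

def paper_suffix_from_tokens_py_alt (tokens : List String) : Option String × Option String :=
  (tokens.foldl pvStep (4, (none, none))).2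

-- ===== PRECONDITION & SPEC =====
def Spec_paper_suffix_from_tokens_py (tokens : List String) (out : Option String × Option String) : Prop := out = paper_suffix_from_tokens_py_alt tokens
instance (tokens : List String) (out : Option String × Option String) : Decidable (Spec_paper_suffix_from_tokens_py tokens out) := by unfold Spec_paper_suffix_from_tokens_py; infer_instance

-- ===== CLAIM (what is proved, stated in full; the proofs are below) =====
def Claim_equal_paper_suffix_from_tokens_py : Prop := ∀ (tokens : List String), Dom_paper_suffix_from_tokens_py tokens → Spec_paper_suffix_from_tokens_py tokens (paper_suffix_from_tokens_py tokens)

-- ===== LEMMAS AND PROOFS =====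

theorem get_P1 : PySem.Dict.get? pvTable "P1" = some (0, (some "Paper 1", some "paper-1")) := by rfl
theorem get_P2 : PySem.Dict.get? pvTable "P2" = some (1, (some "Paper 2", some "paper-2")) := by rfl
theorem get_AB : PySem.Dict.get? pvTable "AB" = some (2, (some "Section AB", some "section-ab")) := by rfl
theorem get_C : PySem.Dict.get? pvTable "C" = some (3, (some "Section C", some "section-c")) := by rfl

theorem get_none (u : String) (h1 : u ≠ "P1") (h2 : u ≠ "P2") (h3 : u ≠ "AB") (h4 : u ≠ "C") :
    PySem.Dict.get? pvTable u = none := by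
  simp [pvTable, PySem.Dict.get?_mk_cons, Ne.symm h1, Ne.symm h2, Ne.symm h3, Ne.symm h4,
    PySem.Dict.get?]

-- Characterisation of B's single-pass fold from an arbitrary (rank, result) state.
theorem pvFold_char (ts : List String) (r : Nat) (acc : Option String × Option String) :
    ts.foldl pvStep (r, acc) =
      if "P1" ∈ ts.map PySem.Str.upper ∧ 0 < r then (0, (some "Paper 1", some "paper-1"))
      else if "P2" ∈ ts.map PySem.Str.upper ∧ 1 < r then (1, (some "Paper 2", some "paper-2"))
      else if "AB" ∈ ts.map PySem.Str.upper ∧ 2 < r then (2, (some "Section AB", some "section-ab"))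
      else if "C" ∈ ts.map PySem.Str.upper ∧ 3 < r then (3, (some "Section C", some "section-c"))
      else (r, acc) := by
  induction ts generalizing r acc with
  | nil => simp
  | cons t ts ih =>
    simp only [List.foldl_cons, List.map_cons]
    by_cases h1 : PySem.Str.upper t = "P1"
    · rw [show pvStep (r, acc) t = if 0 < r then ((0 : Nat), (some "Paper 1", some "paper-1")) else (r, acc) from by
        simp only [pvStep, h1, get_P1]]
      by_cases hr : 0 < r
      · rw [if_pos hr, ih]; simp [h1, hr]
      · have h0 : r = 0 := by omega
        subst h0
        rw [if_neg hr, ih]; simp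
    · by_cases h2 : PySem.Str.upper t = "P2"
      · rw [show pvStep (r, acc) t = if 1 < r then ((1 : Nat), (some "Paper 2", some "paper-2")) else (r, acc) from by
          simp only [pvStep, h2, get_P2]]
        by_cases hr : 1 < r
        · rw [if_pos hr, ih]
          have hr0 : 0 < r := by omega
          by_cases m1 : "P1" ∈ ts.map PySem.Str.upper <;>
            simp [h1, h2, m1, hr, hr0]
        · rw [if_neg hr, ih]
          have n2 : ¬ 2 < r := by omega
          have n3 : ¬ 3 < r := by omega
          by_cases m1 : "P1" ∈ ts.map PySem.Str.upper <;>
            by_cases hr0 : 0 < r <;>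
              simp [h1, h2, m1, hr, hr0, n2, n3]
      · by_cases h3 : PySem.Str.upper t = "AB"
        · rw [show pvStep (r, acc) t = if 2 < r then ((2 : Nat), (some "Section AB", some "section-ab")) else (r, acc) from by
            simp only [pvStep, h3, get_AB]]
          by_cases hr : 2 < r
          · rw [if_pos hr, ih]
            have hr0 : 0 < r := by omega
            have hr1 : 1 < r := by omega
            by_cases m1 : "P1" ∈ ts.map PySem.Str.upper <;>
              by_cases m2 : "P2" ∈ ts.map PySem.Str.upper <;>
                simp [h1, h2, h3, m1, m2, hr, hr0, hr1]
          · rw [if_neg hr, ih]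
            have n3 : ¬ 3 < r := by omega
            by_cases m1 : "P1" ∈ ts.map PySem.Str.upper <;>
              by_cases m2 : "P2" ∈ ts.map PySem.Str.upper <;>
                by_cases hr0 : 0 < r <;>
                  by_cases hr1 : 1 < r <;>
                    simp [h1, h2, h3, m1, m2, hr, hr0, hr1, n3]
        · by_cases h4 : PySem.Str.upper t = "C"
          · rw [show pvStep (r, acc) t = if 3 < r then ((3 : Nat), (some "Section C", some "section-c")) else (r, acc) from by
              simp only [pvStep, h4, get_C]]
            by_cases hr : 3 < r
            · rw [if_pos hr, ih]
              have hr0 : 0 < r := by omega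
              have hr1 : 1 < r := by omega
              have hr2 : 2 < r := by omega
              by_cases m1 : "P1" ∈ ts.map PySem.Str.upper <;>
                by_cases m2 : "P2" ∈ ts.map PySem.Str.upper <;>
                  by_cases m3 : "AB" ∈ ts.map PySem.Str.upper <;>
                    simp [h1, h2, h3, h4, m1, m2, m3, hr, hr0, hr1, hr2]
            · rw [if_neg hr, ih]
              by_cases m1 : "P1" ∈ ts.map PySem.Str.upper <;>
                by_cases m2 : "P2" ∈ ts.map PySem.Str.upper <;>
                  by_cases m3 : "AB" ∈ ts.map PySem.Str.upper <;>
                    by_cases hr0 : 0 < r <;>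
                      by_cases hr1 : 1 < r <;>
                        by_cases hr2 : 2 < r <;>
                          simp [h1, h2, h3, h4, m1, m2, m3, hr, hr0, hr1, hr2]
          · rw [show pvStep (r, acc) t = (r, acc) from by
              simp only [pvStep, get_none _ h1 h2 h3 h4]]
            rw [ih]
            have n1 : "P1" ≠ PySem.Str.upper t := fun h => h1 h.symm
            have n2 : "P2" ≠ PySem.Str.upper t := fun h => h2 h.symm
            have n3 : "AB" ≠ PySem.Str.upper t := fun h => h3 h.symm
            have n4 : "C" ≠ PySem.Str.upper t := fun h => h4 h.symm
            simp [List.mem_cons, n1, n2, n3, n4]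

-- ===== VERDICT (by name: the statement is the Claim_ definition above) =====
theorem paper_suffix_from_tokens_py_spec : Claim_equal_paper_suffix_from_tokens_py := by
  intro tokens _
  unfold Spec_paper_suffix_from_tokens_py paper_suffix_from_tokens_py paper_suffix_from_tokens_py_alt
  rw [pvFold_char]
  by_cases m1 : "P1" ∈ tokens.map PySem.Str.upper <;>
    by_cases m2 : "P2" ∈ tokens.map PySem.Str.upper <;>
      by_cases m3 : "AB" ∈ tokens.map PySem.Str.upper <;>
        by_cases m4 : "C" ∈ tokens.map PySem.Str.upper <;>
          simp [m1, m2, m3, m4]
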